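-- pv_equiv track=rewrite | github.com/algo-gogo/algo_study | 프로그래머스/기출문제/sumer_winter_2018/지형편집.py | solution
-- ===== SOURCE A (Python) =====
-- def solution(land, P, Q):
--     lst = []
--     for i in land:
--         lst += i
--     lst = sorted(lst)
--
--     n = len(lst)
--     answer = sum(lst) * Q
--     cost = (sum(lst) - lst[0] * n) * Q
--     answer = min(answer, cost)
--
--     for i in range(1, n):
--         if lst[i] != lst[i - 1]:
--             cost += (P * i * (lst[i] - lst[i - 1])) - (Q * (n - i) * (lst[i] - lst[i - 1]))
--
--             answer = min(answer, cost)
--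
--     return answer
-- ===== SOURCE B (Python) =====
-- def solution(land, P, Q):
--     lst = sorted([x for row in land for x in row])
--     n = len(lst)
--     prefix = [0]
--     for x in lst:
--         prefix.append(prefix[-1] + x)
--     total = prefix[n]
--     best = total * Q
--     for i in range(n):
--         t = lst[i]
--         c = P * (i * t - prefix[i]) + Q * ((total - prefix[i]) - (n - i) * t)
--         best = min(best, c)
--     return best
-- ===== Notes on version B (the rewrite author's own statement) =====
-- stated objective: alternative
-- what changed: Replaces A's incremental delta update of the cost between adjacent distinct sorted heights by a prefix-sum table with an independent closed-form cost per candidate target height (plus the same target-0 seed).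
import Mathlib
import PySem

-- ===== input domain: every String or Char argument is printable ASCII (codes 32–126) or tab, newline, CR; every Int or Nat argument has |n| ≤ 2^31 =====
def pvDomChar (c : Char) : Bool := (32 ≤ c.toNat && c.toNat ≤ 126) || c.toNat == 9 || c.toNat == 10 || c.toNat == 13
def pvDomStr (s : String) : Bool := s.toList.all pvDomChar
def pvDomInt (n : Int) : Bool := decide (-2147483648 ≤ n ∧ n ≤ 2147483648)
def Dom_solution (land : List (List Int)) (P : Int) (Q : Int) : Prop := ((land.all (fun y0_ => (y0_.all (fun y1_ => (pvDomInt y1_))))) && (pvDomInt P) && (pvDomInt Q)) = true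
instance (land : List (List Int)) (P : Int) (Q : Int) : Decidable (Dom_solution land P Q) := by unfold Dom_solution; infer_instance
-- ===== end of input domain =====

-- B replaces A's incremental delta update over distinct sorted heights by a pref-sum
-- table with an independent closed-form cost per candidate target (alternative, same cost).


-- ===== PORT A =====
def solution (land : List (List Int)) (P : Int) (Q : Int) : Int :=
  let lst := land.foldl (fun acc i => acc ++ i) []
  let lst := PySem.List.sorted lst (fun x => x)
  let n : Int := PySem.List.len lst
  let answer := lst.sum * Q
  -- lst[0]: valid only under Pre_solution (nonempty flattened land); pyGetD is exact there
  let cost := (lst.sum - PySem.List.pyGetD lst 0 0 * n) * Q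
  let answer := min answer cost
  let st := (PySem.List.pyRange 1 n 1).foldl (fun (s : Int × Int) i =>
      if PySem.List.pyGetD lst i 0 ≠ PySem.List.pyGetD lst (i - 1) 0 then
        let cost := s.2 + (P * i * (PySem.List.pyGetD lst i 0 - PySem.List.pyGetD lst (i - 1) 0))
                        - (Q * (n - i) * (PySem.List.pyGetD lst i 0 - PySem.List.pyGetD lst (i - 1) 0))
        (min s.1 cost, cost)
      else s) (answer, cost)
  st.1

-- ===== PORT B =====
def solution_alt (land : List (List Int)) (P : Int) (Q : Int) : Int :=
  let lst := PySem.List.sorted (land.flatMap (fun row => row)) (fun x => x)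
  let n : Int := PySem.List.len lst
  let pref := lst.foldl (fun p x => p ++ [PySem.List.pyGetD p (-1) 0 + x]) [(0 : Int)]
  let total := PySem.List.pyGetD pref n 0
  let best := total * Q
  (PySem.List.pyRange 0 n 1).foldl (fun best i =>
      let t := PySem.List.pyGetD lst i 0
      let c := P * (i * t - PySem.List.pyGetD pref i 0)
             + Q * ((total - PySem.List.pyGetD pref i 0) - (n - i) * t)
      min best c) best

-- ===== PRECONDITION & SPEC =====
-- A indexes lst[0] of the flattened land, so it raises IndexError exactly when land has no cells.
def Pre_solution (land : List (List Int)) (P : Int) (Q : Int) : Prop :=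
  land.flatMap (fun row => row) ≠ []
instance (land : List (List Int)) (P : Int) (Q : Int) : Decidable (Pre_solution land P Q) := by
  unfold Pre_solution; infer_instance

def pvWitness_solution : List (List Int) × Int × Int := ([[1, 2], [3, 1]], 2, 3)

def Spec_solution (land : List (List Int)) (P : Int) (Q : Int) (out : Int) : Prop := out = solution_alt land P Q
instance (land : List (List Int)) (P : Int) (Q : Int) (out : Int) : Decidable (Spec_solution land P Q out) := by unfold Spec_solution; infer_instance

-- ===== CLAIM (what is proved, stated in full; the proofs are below) =====
def Claim_equal_solution : Prop := ∀ (land : List (List Int)) (P : Int) (Q : Int), Dom_solution land P Q → Pre_solution land P Q → Spec_solution land P Q (solution land P Q)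

-- ===== LEMMAS AND PROOFS =====

def pvPre (l : List Int) (k : Nat) : Int := (l.take k).sum

def pvG (l : List Int) (P Q : Int) (k : Nat) : Int :=
  P * ((k : Int) * l.getD k 0 - pvPre l k)
  + Q * ((l.sum - pvPre l k) - ((l.length : Int) - (k : Int)) * l.getD k 0)

def pvStepA (l : List Int) (P Q : Int) (s : Int × Int) (k : Nat) : Int × Int :=
  if l.getD (k+1) 0 ≠ l.getD k 0 then
    let c := s.2 + (P * ((k : Int)+1) * (l.getD (k+1) 0 - l.getD k 0))
                 - (Q * (((l.length : Int)) - ((k : Int)+1)) * (l.getD (k+1) 0 - l.getD k 0))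
    (min s.1 c, c)
  else s

lemma pvPre_succ (l : List Int) (m : Nat) (h : m < l.length) :
    pvPre l (m+1) = pvPre l m + l.getD m 0 := by
  unfold pvPre
  rw [List.take_add_one, List.sum_append, List.getD_eq_getElem l 0 h]
  simp [List.getElem?_eq_getElem h]

lemma pvG_succ (l : List Int) (P Q : Int) (m : Nat) (h : m + 1 < l.length) :
    pvG l P Q (m+1) = pvG l P Q m
      + (P * ((m : Int)+1) * (l.getD (m+1) 0 - l.getD m 0))
      - (Q * (((l.length : Int)) - ((m : Int)+1)) * (l.getD (m+1) 0 - l.getD m 0)) := by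
  have hp := pvPre_succ l m (by omega)
  simp only [pvG, hp]
  push_cast
  ring

lemma pvG_zero (l : List Int) (P Q : Int) :
    pvG l P Q 0 = (l.sum - l.getD 0 0 * l.length) * Q := by
  simp [pvG, pvPre]; ring

lemma pv_inv (l : List Int) (P Q : Int) :
    ∀ m, m < l.length →
      (((List.range m).foldl (pvStepA l P Q)
          (min (l.sum * Q) ((l.sum - l.getD 0 0 * l.length) * Q),
           (l.sum - l.getD 0 0 * l.length) * Q)).1
        = (List.range (m+1)).foldl (fun x k => min x (pvG l P Q k)) (l.sum * Q))
      ∧ (((List.range m).foldl (pvStepA l P Q)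
          (min (l.sum * Q) ((l.sum - l.getD 0 0 * l.length) * Q),
           (l.sum - l.getD 0 0 * l.length) * Q)).2 = pvG l P Q m)
      ∧ ((List.range (m+1)).foldl (fun x k => min x (pvG l P Q k)) (l.sum * Q)
          ≤ pvG l P Q m) := by
  intro m
  induction m with
  | zero =>
    intro _
    simp [List.range_succ, pvG_zero]
  | succ m ih =>
    intro h
    obtain ⟨h1, h2, h3⟩ := ih (by omega)
    rw [List.range_succ, List.foldl_append, List.range_succ (n := m + 1), List.foldl_append]
    simp only [List.foldl_cons, List.foldl_nil]
    have hg := pvG_succ l P Q m h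
    by_cases hd : l.getD (m+1) 0 = l.getD m 0
    · have hg' : pvG l P Q (m+1) = pvG l P Q m := by rw [hg, hd]; ring
      have hcond := not_not_intro hd
      refine ⟨?_, ?_, ?_⟩
      · simp only [pvStepA]
        rw [if_neg hcond, h1, hg', min_eq_left h3]
      · simp only [pvStepA]
        rw [if_neg hcond, h2, hg']
      · rw [hg']; exact le_trans (min_le_left _ _) h3
    · refine ⟨?_, ?_, ?_⟩
      · simp only [pvStepA]
        rw [if_pos hd, h1, h2, ← hg]
      · simp only [pvStepA]
        rw [if_pos hd, h2, ← hg]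
      · exact min_le_right _ _

lemma pvFlatten (land : List (List Int)) (acc : List Int) :
    land.foldl (fun acc i => acc ++ i) acc = acc ++ land.flatMap (fun row => row) := by
  induction land generalizing acc with
  | nil => simp
  | cons r t ih => simp [ih, List.append_assoc]

lemma pvPrefFold (l : List Int) (acc : List Int) (s : Int) :
    l.foldl (fun p x => p ++ [PySem.List.pyGetD p (-1) 0 + x]) (acc ++ [s])
      = acc ++ [s] ++ (List.range l.length).map (fun k => s + (l.take (k+1)).sum) := by
  induction l generalizing acc s with
  | nil => simp
  | cons x t ih =>
    simp only [List.foldl_cons, PySem.List.pyGetD_neg_one_append_singleton]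
    rw [show acc ++ [s] ++ [s + x] = (acc ++ [s]) ++ [s + x] by simp, ih]
    simp [List.range_succ_eq_map, List.map_map, Function.comp, add_assoc, List.append_assoc]

lemma pvPref_getD (l : List Int) (k : Nat) (hk : k ≤ l.length) :
    PySem.List.pyGetD (l.foldl (fun p x => p ++ [PySem.List.pyGetD p (-1) 0 + x]) [(0:Int)]) (k : Int) 0
      = pvPre l k := by
  have h := pvPrefFold l [] 0
  simp only [List.nil_append] at h
  rw [h, PySem.List.pyGetD_natCast]
  cases k with
  | zero => simp [pvPre]
  | succ k =>
    simp only [List.singleton_append, List.getD_cons_succ]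
    have hk' : k < l.length := by omega
    rw [List.getD_eq_getElem _ _ (by simpa using hk')]
    simp [pvPre, hk']

lemma pvBridgeA (l : List Int) (P Q : Int) (init : Int × Int) :
    (PySem.List.pyRange 1 (PySem.List.len l) 1).foldl (fun (s : Int × Int) i =>
        if PySem.List.pyGetD l i 0 ≠ PySem.List.pyGetD l (i - 1) 0 then
          let cost := s.2 + (P * i * (PySem.List.pyGetD l i 0 - PySem.List.pyGetD l (i - 1) 0))
                          - (Q * (PySem.List.len l - i) * (PySem.List.pyGetD l i 0 - PySem.List.pyGetD l (i - 1) 0))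
          (min s.1 cost, cost)
        else s) init
      = (List.range (l.length - 1)).foldl (pvStepA l P Q) init := by
  rw [PySem.List.len_eq, PySem.List.pyRange_one, List.foldl_map]
  rw [show ((l.length : Int) - 1).toNat = l.length - 1 by omega]
  apply PySem.List.foldl_congr_mem
  intro acc k _
  have h2 : (1:Int) + (k:Int) - 1 = ((k : Nat) : Int) := by omega
  have h1 : (1:Int) + (k:Int) = ((k+1 : Nat) : Int) := by push_cast; ring
  rw [h2, h1]
  simp only [PySem.List.pyGetD_natCast, pvStepA]
  push_cast
  rfl

lemma pvBridgeB (l : List Int) (P Q : Int) (b0 : Int) :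
    (PySem.List.pyRange 0 (PySem.List.len l) 1).foldl (fun best i =>
        min best (P * (i * PySem.List.pyGetD l i 0
            - PySem.List.pyGetD (l.foldl (fun p x => p ++ [PySem.List.pyGetD p (-1) 0 + x]) [(0:Int)]) i 0)
          + Q * ((PySem.List.pyGetD (l.foldl (fun p x => p ++ [PySem.List.pyGetD p (-1) 0 + x]) [(0:Int)]) (PySem.List.len l) 0
                  - PySem.List.pyGetD (l.foldl (fun p x => p ++ [PySem.List.pyGetD p (-1) 0 + x]) [(0:Int)]) i 0)
                - (PySem.List.len l - i) * PySem.List.pyGetD l i 0))) b0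
      = (List.range l.length).foldl (fun x k => min x (pvG l P Q k)) b0 := by
  have htot : PySem.List.pyGetD (l.foldl (fun p x => p ++ [PySem.List.pyGetD p (-1) 0 + x]) [(0:Int)]) (PySem.List.len l) 0 = l.sum := by
    rw [PySem.List.len_eq, pvPref_getD l l.length le_rfl]
    simp [pvPre]
  rw [PySem.List.len_eq, PySem.List.pyRange_zero, List.foldl_map,
      show ((l.length : Int)).toNat = l.length by omega]
  apply PySem.List.foldl_congr_mem
  intro acc k hk
  rw [List.mem_range] at hk
  rw [PySem.List.pyGetD_natCast l, pvPref_getD l k (le_of_lt hk)]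
  rw [PySem.List.len_eq] at htot
  rw [htot]
  rfl

lemma pvFlatten0 (land : List (List Int)) :
    land.foldl (fun acc i => acc ++ i) [] = land.flatMap (fun row => row) := by
  rw [pvFlatten]; simp


-- ===== VERDICT (by name: the statement is the Claim_ definition above) =====
theorem solution_spec : Claim_equal_solution := by
  unfold Claim_equal_solution
  intro land P Q _ hpre
  unfold Spec_solution solution solution_alt
  simp only [pvFlatten0]
  have hne : (PySem.List.sorted (land.flatMap fun row => row) (fun x => x)).length ≠ 0 := by
    rw [PySem.List.length_sorted]
    intro h0
    exact hpre (List.eq_nil_of_length_eq_zero h0)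
  set l := PySem.List.sorted (land.flatMap fun row => row) (fun x => x) with hl
  rw [pvBridgeA l P Q _, pvBridgeB l P Q _]
  have htot : PySem.List.pyGetD (l.foldl (fun p x => p ++ [PySem.List.pyGetD p (-1) 0 + x]) [(0:Int)]) (PySem.List.len l) 0 = l.sum := by
    rw [PySem.List.len_eq, pvPref_getD l l.length le_rfl]
    simp [pvPre]
  rw [htot, PySem.List.pyGetD_zero, PySem.List.len_eq]
  obtain ⟨h1, _, _⟩ := pv_inv l P Q (l.length - 1) (by omega)
  rw [show l.length - 1 + 1 = l.length by omega] at h1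
  exact h1
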